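-- pv_equiv track=rewrite | github.com/jcstotomas/DS-AImplemented | HeapSort.py | percolateUp
-- ===== SOURCE A (Python) =====
-- def percolateUp(heap):
--     i = len(heap) - 1;
--     while i//2 > 0:
--         parent = i // 2;
--         if heap[i] <= heap[parent]:
--             heap[i], heap[parent] = heap[parent], heap[i];
--         i = i // 2;
--
--     return heap;
-- ===== SOURCE B (Python) =====
-- def percolateUp(heap):
--     # Stage 1: collect the root-path indices last, last//2, ..., down to 1.
--     idxs = []
--     i = len(heap) - 1
--     while i >= 2:
--         idxs.append(i)
--         i //= 2
--     if not idxs: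
--         return heap
--     idxs.append(1)
--     # Stage 2: pure scan over the path values, bubbling the carried value up.
--     vals = [heap[j] for j in idxs]
--     out = []
--     carry = vals[0]
--     for p in vals[1:]:
--         if carry <= p:
--             out.append(p)
--         else:
--             out.append(carry)
--             carry = p
--     out.append(carry)
--     # Stage 3: write the new path values back.
--     for j, v in zip(idxs, out):
--         heap[j] = v
--     return heap
-- ===== Notes on version B (the rewrite author's own statement) =====
-- stated objective: alternative
-- what changed: A is one destructive loop that swaps heap cells while halving the index; B decomposes the task into three stages: collect the root-path indices, compute all new path values at once with a pure carry scan over the extracted values, then write them back in one pass.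
import Mathlib
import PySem

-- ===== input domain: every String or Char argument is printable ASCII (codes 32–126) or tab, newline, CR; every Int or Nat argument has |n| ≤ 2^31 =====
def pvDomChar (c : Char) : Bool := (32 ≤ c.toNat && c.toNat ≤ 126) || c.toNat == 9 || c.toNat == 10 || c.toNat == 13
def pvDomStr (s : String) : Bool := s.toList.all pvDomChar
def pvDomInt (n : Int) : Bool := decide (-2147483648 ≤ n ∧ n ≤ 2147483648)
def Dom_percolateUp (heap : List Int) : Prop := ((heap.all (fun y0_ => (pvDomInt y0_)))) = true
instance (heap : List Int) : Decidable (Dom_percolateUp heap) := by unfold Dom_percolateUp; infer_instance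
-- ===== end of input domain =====

-- B replaces A's in-place swap walk by three stages: collect the root-path indices, a pure
-- left-to-right scan computing all new path values at once, then one write-back pass
-- (objective: alternative). Both Pythons mutate `heap` in place; equivalence here is about
-- the return value.

-- Python indexing heap[j], total form (both programs only index in range on real runs).
def pvGet (h : List Int) (j : Int) : Int := (PySem.List.pyGet? h j).getD 0

-- Python's simultaneous swap `heap[i], heap[j] = heap[j], heap[i]`.
def pySwap (heap : List Int) (i j : Int) : List Int :=
  PySem.List.pySetD (PySem.List.pySetD heap i (pvGet heap j)) j (pvGet heap i)

-- ===== PORT A =====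
def percLoop (heap : List Int) (i : Int) : List Int :=
  if 0 < PySem.Int.floordiv i 2 then
    let parent := PySem.Int.floordiv i 2
    let heap' := if pvGet heap i ≤ pvGet heap parent then pySwap heap i parent else heap
    percLoop heap' parent
  else heap
termination_by i.toNat
decreasing_by
  have h2 : (2:Int) ≤ i := by
    have := (PySem.Int.le_floordiv_iff_mul_le (a := i) (b := 2) (q := 1) (by omega)).mp (by omega)
    omega
  have := PySem.Int.floordiv_eq_ediv_of_pos (a := i) (b := 2) (by omega)
  simp only [this]
  omega

def percolateUp (heap : List Int) : List Int := percLoop heap ((heap.length : Int) - 1)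

-- ===== PORT B =====
-- Stage 1 of Source B: the while-loop collecting indices i, i//2, ... while i >= 2.
def bPath (i : Int) : List Int :=
  if 2 ≤ i then i :: bPath (PySem.Int.floordiv i 2) else []
termination_by i.toNat
decreasing_by
  have := PySem.Int.floordiv_eq_ediv_of_pos (a := i) (b := 2) (by omega)
  simp only [this]
  omega

-- Stage 2 of Source B: one step of the pure scan (accumulated output list, carried value).
def scanStep (st : List Int × Int) (p : Int) : List Int × Int :=
  if st.2 ≤ p then (st.1 ++ [p], st.2) else (st.1 ++ [st.2], p)

def percolateUp_alt (heap : List Int) : List Int :=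
  match bPath ((heap.length : Int) - 1) with
  | [] => heap
  | j0 :: jrest =>
    let idtail := jrest ++ [1]
    let st := (idtail.map (fun j => pvGet heap j)).foldl scanStep ([], pvGet heap j0)
    ((j0 :: idtail).zip (st.1 ++ [st.2])).foldl
      (fun h jv => PySem.List.pySetD h jv.1 jv.2) heap

-- ===== PRECONDITION & SPEC =====
def Spec_percolateUp (heap : List Int) (out : List Int) : Prop := out = percolateUp_alt heap
instance (heap : List Int) (out : List Int) : Decidable (Spec_percolateUp heap out) := by unfold Spec_percolateUp; infer_instance

-- ===== CLAIM (what is proved, stated in full; the proofs are below) =====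
def Claim_equal_percolateUp : Prop := ∀ (heap : List Int), Dom_percolateUp heap → Spec_percolateUp heap (percolateUp heap)

-- ===== LEMMAS AND PROOFS =====

-- B's body at an arbitrary start index (proof-side generalisation of percolateUp_alt).
def bRun (heap : List Int) (i : Int) : List Int :=
  match bPath i with
  | [] => heap
  | j0 :: jrest =>
    let idtail := jrest ++ [1]
    let st := (idtail.map (fun j => pvGet heap j)).foldl scanStep ([], pvGet heap j0)
    ((j0 :: idtail).zip (st.1 ++ [st.2])).foldl
      (fun h jv => PySem.List.pySetD h jv.1 jv.2) heap

theorem alt_eq_bRun (heap : List Int) :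
    percolateUp_alt heap = bRun heap ((heap.length : Int) - 1) := rfl

-- floordiv i 2 is positive iff 2 ≤ i
theorem floordiv_two_pos (i : Int) : 0 < PySem.Int.floordiv i 2 ↔ 2 ≤ i := by
  constructor
  · intro h
    have := (PySem.Int.le_floordiv_iff_mul_le (a := i) (b := 2) (q := 1) (by omega)).mp (by omega)
    omega
  · intro h
    have e := PySem.Int.floordiv_eq_ediv_of_pos (a := i) (b := 2) (by omega)
    rw [e]; omega

-- the scan fold only appends to the accumulator
theorem scan_acc (l : List Int) : ∀ (acc : List Int) (c : Int),
    l.foldl scanStep (acc, c) =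
      (acc ++ (l.foldl scanStep ([], c)).1, (l.foldl scanStep ([], c)).2) := by
  induction l with
  | nil => intro acc c; simp
  | cons x xs ih =>
    intro acc c
    simp only [List.foldl_cons, scanStep, List.nil_append]
    split_ifs with h
    · rw [ih (acc ++ [x]) c, ih [x] c]
      simp
    · rw [ih (acc ++ [c]) x, ih [c] x]
      simp

-- every index on the collected path is ≥ 2 and ≤ its start
theorem bPath_mem : ∀ (n : Nat) (i : Int), i.toNat ≤ n →
    ∀ j ∈ bPath i, 2 ≤ j ∧ j ≤ i := by
  intro n
  induction n with
  | zero =>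
    intro i hi j hj
    rw [bPath] at hj
    have : ¬ (2 ≤ i) := by omega
    simp [this] at hj
  | succ n ih =>
    intro i hi j hj
    rw [bPath] at hj
    by_cases h2 : 2 ≤ i
    · simp only [if_pos h2, List.mem_cons] at hj
      rcases hj with rfl | hj
      · exact ⟨h2, le_refl _⟩
      · have e := PySem.Int.floordiv_eq_ediv_of_pos (a := i) (b := 2) (by omega)
        have := ih (PySem.Int.floordiv i 2) (by rw [e]; omega) j hj
        rw [e] at this
        omega
    · simp [h2] at hj

-- reading past a write at a different (nonnegative) index
theorem pvGet_set (h : List Int) (k : Int) (v : Int) (j : Int) (hk : 0 ≤ k) (hj : 0 ≤ j)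
    (hne : j ≠ k) : pvGet (PySem.List.pySetD h k v) j = pvGet h j := by
  rw [pvGet, pvGet, PySem.List.pySetD_of_nonneg _ _ hk, PySem.List.pyGet?_of_nonneg _ hj,
    PySem.List.pyGet?_of_nonneg _ hj, List.getElem?_set_ne (by omega)]

-- writing back the value just read is a no-op
theorem set_self (h : List Int) (j : Int) (hj : 0 ≤ j) :
    PySem.List.pySetD h j (pvGet h j) = h := by
  rw [pvGet, PySem.List.pySetD_of_nonneg _ _ hj, PySem.List.pyGet?_of_nonneg _ hj]
  by_cases hlt : j.toNat < h.length
  · rw [List.getElem?_eq_getElem hlt]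
    exact List.set_getElem_self ..
  · exact List.set_eq_of_length_le (by omega)

-- consecutive writes at one index: the last one wins
theorem set_set (h : List Int) (j : Int) (a b : Int) (hj : 0 ≤ j) :
    PySem.List.pySetD (PySem.List.pySetD h j a) j b = PySem.List.pySetD h j b := by
  rw [PySem.List.pySetD_of_nonneg _ _ hj, PySem.List.pySetD_of_nonneg _ _ hj,
    PySem.List.pySetD_of_nonneg _ _ hj, List.set_set]

-- after the swap, the parent slot holds the old child value
theorem pvGet_swap_parent (heap : List Int) (i p : Int) (hp : 0 ≤ p) (hpi : p < i) :
    pvGet (pySwap heap i p) p = pvGet heap i := by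
  have hi0 : 0 ≤ i := by omega
  unfold pySwap
  rw [pvGet, PySem.List.pySetD_of_nonneg _ _ hp, PySem.List.pyGet?_of_nonneg _ hp]
  by_cases hlt : p.toNat < (PySem.List.pySetD heap i (pvGet heap p)).length
  · rw [List.getElem?_set_self (by omega)]
    rfl
  · rw [PySem.List.pySetD_of_nonneg _ _ hi0, List.length_set] at hlt
    rw [PySem.List.pySetD_of_nonneg _ _ hi0]
    rw [List.set_eq_of_length_le (by simp; omega)]
    rw [List.set_eq_of_length_le (by omega), List.getElem?_eq_none (by omega)]
    rw [pvGet, PySem.List.pyGet?_of_nonneg _ hi0, List.getElem?_eq_none (by omega)]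

-- a write at p followed by the fold's own first write at p is absorbed
theorem fold_overwrite (outs Z : List Int) (X : List Int) (p v : Int) (hp : 0 ≤ p)
    (hne : outs ≠ []) :
    ((p :: Z).zip outs).foldl (fun h jv => PySem.List.pySetD h jv.1 jv.2)
        (PySem.List.pySetD X p v) =
    ((p :: Z).zip outs).foldl (fun h jv => PySem.List.pySetD h jv.1 jv.2) X := by
  cases outs with
  | nil => exact absurd rfl hne
  | cons w ws =>
    simp only [List.zip_cons_cons, List.foldl_cons]
    rw [set_set X p v w hp]

-- one unfolding of A's step against B's scan, swap branch, with the tail values abstracted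
theorem step_swap (heap : List Int) (i p : Int) (T M : List Int) (hp0 : 0 ≤ p) :
    ((p :: T).zip ((M.foldl scanStep ([], pvGet heap i)).1 ++
        [(M.foldl scanStep ([], pvGet heap i)).2])).foldl
      (fun h jv => PySem.List.pySetD h jv.1 jv.2) (pySwap heap i p) =
    ((i :: p :: T).zip ((M.foldl scanStep ([pvGet heap p], pvGet heap i)).1 ++
        [(M.foldl scanStep ([pvGet heap p], pvGet heap i)).2])).foldl
      (fun h jv => PySem.List.pySetD h jv.1 jv.2) heap := by
  rw [scan_acc M [pvGet heap p] (pvGet heap i)]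
  simp only [List.cons_append, List.nil_append, List.zip_cons_cons, List.foldl_cons]
  unfold pySwap
  rw [fold_overwrite _ T _ p (pvGet heap i) hp0 (by simp)]

-- the same, no-swap branch
theorem step_noswap (heap : List Int) (i p : Int) (T M : List Int) (hi0 : 0 ≤ i) :
    ((p :: T).zip ((M.foldl scanStep ([], pvGet heap p)).1 ++
        [(M.foldl scanStep ([], pvGet heap p)).2])).foldl
      (fun h jv => PySem.List.pySetD h jv.1 jv.2) heap =
    ((i :: p :: T).zip ((M.foldl scanStep ([pvGet heap i], pvGet heap p)).1 ++
        [(M.foldl scanStep ([pvGet heap i], pvGet heap p)).2])).foldl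
      (fun h jv => PySem.List.pySetD h jv.1 jv.2) heap := by
  rw [scan_acc M [pvGet heap i] (pvGet heap p)]
  simp only [List.cons_append, List.nil_append, List.zip_cons_cons, List.foldl_cons]
  rw [set_self heap i hi0]

theorem bPath_one : bPath 1 = [] := by rw [bPath]; norm_num

theorem bRun_one (X : List Int) : bRun X 1 = X := by rw [bRun, bPath_one]

-- main induction: A's loop = B's staged computation, from any start index
theorem main_key : ∀ (n : Nat) (i : Int) (heap : List Int), i.toNat ≤ n →
    percLoop heap i = bRun heap i := by
  intro n
  induction n with
  | zero =>
    intro i heap hi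
    have h2 : ¬ (2 ≤ i) := by omega
    rw [percLoop, if_neg (by rw [floordiv_two_pos]; exact h2), bRun, bPath, if_neg h2]
  | succ n ih =>
    intro i heap hi
    by_cases h2 : 2 ≤ i
    case neg =>
      rw [percLoop, if_neg (by rw [floordiv_two_pos]; exact h2), bRun, bPath, if_neg h2]
    case pos =>
    have hpe : PySem.Int.floordiv i 2 = i / 2 := PySem.Int.floordiv_eq_ediv_of_pos (by omega)
    obtain ⟨p, hpdef⟩ : ∃ p, PySem.Int.floordiv i 2 = p := ⟨_, rfl⟩
    rw [hpdef] at hpe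
    have hp1 : 1 ≤ p := by omega
    have hpi : p < i := by omega
    have hitoNat : p.toNat ≤ n := by omega
    rw [percLoop, if_pos (by rw [floordiv_two_pos]; exact h2)]
    show percLoop
        (if pvGet heap i ≤ pvGet heap (PySem.Int.floordiv i 2) then
          pySwap heap i (PySem.Int.floordiv i 2) else heap) (PySem.Int.floordiv i 2) = bRun heap i
    rw [hpdef, ih p _ hitoNat]
    have hbpi : bPath i = i :: bPath p := by rw [bPath, if_pos h2, hpdef]
    conv_rhs => rw [bRun, hbpi]
    by_cases hq2 : 2 ≤ p
    case neg =>
      -- p = 1 : the path is [i, 1]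
      have hp1' : p = 1 := by omega
      have hbp : bPath p = [] := by rw [bPath, if_neg hq2]
      rw [hp1'] at hbp
      rw [hp1', hbp]
      simp only [List.nil_append, List.map_cons, List.map_nil, List.foldl_cons,
        List.foldl_nil, scanStep]
      by_cases hsw : pvGet heap i ≤ pvGet heap 1
      · rw [if_pos hsw, if_pos hsw, bRun_one]
        unfold pySwap
        rfl
      · rw [if_neg hsw, if_neg hsw, bRun_one]
        simp only [List.singleton_append, List.zip_cons_cons, List.zip_nil_right,
          List.foldl_cons, List.foldl_nil]
        rw [set_self heap i (by omega), set_self heap 1 (by omega)]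
    case pos =>
      have hbp : bPath p = p :: bPath (PySem.Int.floordiv p 2) := by
        rw [bPath, if_pos hq2]
      set T := bPath (PySem.Int.floordiv p 2) ++ [1] with hT
      have hTmem : ∀ j ∈ T, 0 ≤ j ∧ j < p ∧ j ≠ i := by
        intro j hj
        rw [hT, List.mem_append] at hj
        rcases hj with hj | hj
        · have e := PySem.Int.floordiv_eq_ediv_of_pos (a := p) (b := 2) (by omega)
          have := bPath_mem (PySem.Int.floordiv p 2).toNat _ (le_refl _) j hj
          rw [e] at this
          exact ⟨by omega, by omega, by omega⟩
        · simp at hj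
          subst hj
          exact ⟨by omega, by omega, by omega⟩
      rw [hbp]
      by_cases hsw : pvGet heap i ≤ pvGet heap p
      · rw [if_pos hsw, bRun, hbp]
        simp only [List.cons_append, List.map_cons, List.foldl_cons]
        rw [show T.map (fun j => pvGet (pySwap heap i p) j) = T.map (fun j => pvGet heap j)
            from List.map_congr_left (by
              intro j hj
              obtain ⟨hj0, hjp, hji⟩ := hTmem j hj
              unfold pySwap
              rw [pvGet_set _ p _ j (by omega) hj0 (by omega),
                pvGet_set _ i _ j (by omega) hj0 hji])]
        rw [pvGet_swap_parent heap i p (by omega) hpi]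
        rw [show scanStep ([], pvGet heap i) (pvGet heap p) = ([pvGet heap p], pvGet heap i)
            from by simp [scanStep, hsw]]
        exact step_swap heap i p T _ (by omega)
      · rw [if_neg hsw, bRun, hbp]
        simp only [List.cons_append, List.map_cons, List.foldl_cons]
        rw [show scanStep ([], pvGet heap i) (pvGet heap p) = ([pvGet heap i], pvGet heap p)
            from by simp [scanStep, hsw]]
        exact step_noswap heap i p T _ (by omega)

-- ===== VERDICT (by name: the statement is the Claim_ definition above) =====
theorem percolateUp_spec : Claim_equal_percolateUp := by
  intro heap _
  unfold Spec_percolateUp percolateUp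
  rw [alt_eq_bRun]
  exact main_key ((heap.length : Int) - 1).toNat _ heap (le_refl _)
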